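-- pv_equiv track=rewrite | github.com/ericjharaldsson/vfx | utilities/renaming.py | flip_side
-- ===== SOURCE A (Python) =====
-- def flip_side(node):
--     pairs = [
--             ["l", "r"],
--             ["L", "R"],
--             ["left", "right"],
--             ["Left", "Right"],
--             ["LEFT", "RIGHT"]
--     ]
--     full_new_name = list()
--
--     for part in node.split("|"):
--         splits = part.split("_")
--         new_name = list()
--         for split in splits:
--             for pair in pairs:
--                 if split in pair:
--                     split = pair[not pair.index(split)]
--                     break
--             new_name.append(split)
--         full_new_name.append("_".join(new_name))
--
--     return "|".join(full_new_name)
-- ===== SOURCE B (Python) =====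
-- import re
--
-- _PAIRS = [("l", "r"), ("L", "R"), ("left", "right"), ("Left", "Right"), ("LEFT", "RIGHT")]
-- _FLIP = {}
-- for _a, _b in _PAIRS:
--     _FLIP[_a] = _b
--     _FLIP[_b] = _a
--
--
-- def flip_side(node):
--     # one regex pass over the string: every maximal run of non-delimiter
--     # characters is looked up in the flip map, all '|'/'_' delimiters
--     # (and empty tokens) are preserved in place automatically
--     return re.sub(r"[^|_]+", lambda m: _FLIP.get(m.group(), m.group()), node)
-- ===== Notes on version B (the rewrite author's own statement) =====
-- stated objective: idiomatic
-- what changed: Replaced the nested split-on-pipe/split-on-underscore/pairs-scan/join structure by a single re.sub pass that rewrites each maximal run of non-delimiter characters via a precomputed bidirectional flip dict while leaving every delimiter in place.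
import Mathlib
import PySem

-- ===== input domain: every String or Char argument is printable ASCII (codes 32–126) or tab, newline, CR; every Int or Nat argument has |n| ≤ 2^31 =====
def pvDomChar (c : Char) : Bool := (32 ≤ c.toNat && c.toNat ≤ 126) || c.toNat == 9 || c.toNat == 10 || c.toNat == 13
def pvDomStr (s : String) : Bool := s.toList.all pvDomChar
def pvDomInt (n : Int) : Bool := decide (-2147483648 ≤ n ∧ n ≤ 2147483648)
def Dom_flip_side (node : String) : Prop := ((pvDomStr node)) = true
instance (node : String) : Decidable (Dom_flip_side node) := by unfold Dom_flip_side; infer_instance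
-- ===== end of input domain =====

-- B swaps A's nested split-on-pipe/split-on-underscore/pairs-scan/join structure for one regex-style scan
-- (maximal non-delimiter runs looked up in a bidirectional flip dict); objective: idiomatic.

-- ===== PORT A =====

-- s.split(sep) for a nonempty sep (exact: PySem.Str.split? minus the impossible sep = "" case)
def pySplit (s sep : String) : List String :=
  (PySem.Chars.splitOn s.toList sep.toList).map String.ofList

def pvPairsA : List (List String) :=
  [["l", "r"], ["L", "R"], ["left", "right"], ["Left", "Right"], ["LEFT", "RIGHT"]]

-- the inner 'for pair in pairs: if split in pair: split = pair[not pair.index(split)]; break'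
def flipTokA : List (List String) → String → String
  | [], t => t
  | pair :: rest, t =>
    if pair.contains t then
      match PySem.List.index? pair t with
      | some i => (PySem.List.pyGet? pair (if i == 0 then 1 else 0)).getD t
        -- defaults unreachable: contains t holds so index? succeeds, and every pair has 2 entries
      | none => t
    else flipTokA rest t

def flip_side (node : String) : String :=
  PySem.Str.join "|"
    ((pySplit node "|").map (fun part =>
      PySem.Str.join "_" ((pySplit part "_").map (flipTokA pvPairsA))))

-- ===== PORT B =====

-- the module-level _FLIP dict of Source B, built from the five pairs in both directions
def pvFlipDict : PySem.Dict String String :=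
  ([("l", "r"), ("L", "R"), ("left", "right"), ("Left", "Right"), ("LEFT", "RIGHT")]).foldl
    (fun d p => (d.insert p.1 p.2).insert p.2 p.1) PySem.Dict.empty

-- _FLIP.get(tok, tok)
def flipTokB (t : String) : String := pvFlipDict.getD t t

def pvNonDelim (c : Char) : Bool := !(c == '|' || c == '_')

-- the re.sub scan of Source B: each maximal run of non-delimiter chars is flipped,
-- every delimiter char is copied through
def scanB : List Char → List Char
  | [] => []
  | c :: rest =>
    if pvNonDelim c then
      (flipTokB (String.ofList (c :: rest.takeWhile pvNonDelim))).toList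
        ++ scanB (rest.dropWhile pvNonDelim)
    else c :: scanB rest
  termination_by s => s.length
  decreasing_by
    · exact Nat.lt_succ_of_le (List.length_dropWhile_le _ _)
    · simp

def flip_side_alt (node : String) : String := String.ofList (scanB node.toList)

-- ===== PRECONDITION & SPEC =====
def Spec_flip_side (node : String) (out : String) : Prop := out = flip_side_alt node
instance (node : String) (out : String) : Decidable (Spec_flip_side node out) := by unfold Spec_flip_side; infer_instance

-- ===== CLAIM (what is proved, stated in full; the proofs are below) =====
def Claim_equal_flip_side : Prop := ∀ (node : String), Dom_flip_side node → Spec_flip_side node (flip_side node)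

-- ===== LEMMAS AND PROOFS =====

-- single-char split, (first piece, remaining pieces) form
def sp (d : Char) : List Char → List Char × List (List Char)
  | [] => ([], [])
  | c :: s =>
    let r := sp d s
    if c = d then ([], r.1 :: r.2) else (c :: r.1, r.2)

-- join of mapped pieces, flatMap form
def jn (d : Char) (f : List Char → List Char) (x : List Char × List (List Char)) : List Char :=
  f x.1 ++ x.2.flatMap (fun q => d :: f q)

def gB (l : List Char) : List Char := (flipTokB (String.ofList l)).toList

-- what port A computes, at the char level
def Fa (s : List Char) : List Char :=
  jn '|' (fun part => jn '_' gB (sp '_' part)) (sp '|' s)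

lemma splitOn_go_spec (d : Char) :
    ∀ (fuel : Nat) (l cur : List Char) (acc : List (List Char)), l.length < fuel →
      PySem.Chars.splitOn.go [d] fuel l cur acc
        = acc.reverse ++ ((cur.reverse ++ (sp d l).1) :: (sp d l).2) := by
  intro fuel
  induction fuel with
  | zero => intro l cur acc h; omega
  | succ n ih =>
    intro l cur acc h
    cases l with
    | nil => simp [PySem.Chars.splitOn.go, sp]
    | cons c rest =>
      rw [PySem.Chars.splitOn.go]
      by_cases hc : c = d
      · subst hc
        have hp : [c].isPrefixOf (c :: rest) = true := by simp [List.isPrefixOf]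
        rw [if_pos hp, ih _ _ _ (by simp at h ⊢; omega)]
        simp [sp]
      · have hp : [d].isPrefixOf (c :: rest) = false := by
          simp [List.isPrefixOf]; exact fun hdc => hc hdc.symm
        rw [if_neg (by simp [hp]), ih _ _ _ (by simp at h ⊢; omega)]
        simp [sp, hc]

lemma splitOn_eq_sp (d : Char) (s : List Char) :
    PySem.Chars.splitOn s [d] = (sp d s).1 :: (sp d s).2 := by
  have := splitOn_go_spec d (s.length + 1) s [] [] (by omega)
  simpa [PySem.Chars.splitOn] using this

lemma intercalate_eq_flatMap (d : Char) (p : List Char) (ps : List (List Char)) :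
    List.intercalate [d] (p :: ps) = p ++ ps.flatMap (fun q => d :: q) := by
  induction ps generalizing p with
  | nil => simp [List.intercalate]
  | cons q qs ih =>
    have hq := ih q
    simp only [List.intercalate] at hq ⊢
    simp [List.intersperse, hq]

lemma join_map_eq_jn (d : Char) (f : List Char → List Char) (x : List Char × List (List Char)) :
    PySem.Chars.join [d] (List.map f (x.1 :: x.2)) = jn d f x := by
  simp [PySem.Chars.join, intercalate_eq_flatMap, jn, List.flatMap_map]

lemma flip_agree (t : String) : flipTokA pvPairsA t = flipTokB t := by
  by_cases h1 : t = "l"; · subst h1; decide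
  by_cases h2 : t = "r"; · subst h2; decide
  by_cases h3 : t = "L"; · subst h3; decide
  by_cases h4 : t = "R"; · subst h4; decide
  by_cases h5 : t = "left"; · subst h5; decide
  by_cases h6 : t = "right"; · subst h6; decide
  by_cases h7 : t = "Left"; · subst h7; decide
  by_cases h8 : t = "Right"; · subst h8; decide
  by_cases h9 : t = "LEFT"; · subst h9; decide
  by_cases h10 : t = "RIGHT"; · subst h10; decide
  simp [flipTokA, pvPairsA, flipTokB, pvFlipDict, PySem.Dict.getD_insert, PySem.Dict.getD_empty,
    h1, h2, h3, h4, h5, h6, h7, h8, h9, h10]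

lemma gB_nil : gB [] = [] := by decide

lemma sp_append_nondelim (d : Char) (u t : List Char) (h : ∀ c ∈ u, ¬ c = d) :
    sp d (u ++ t) = (u ++ (sp d t).1, (sp d t).2) := by
  induction u with
  | nil => simp
  | cons c u ih =>
    have hc : ¬ c = d := h c (by simp)
    simp only [List.cons_append, sp, ih (fun x hx => h x (by simp [hx])), hc]
    simp

lemma Fa_pipe (s : List Char) : Fa ('|' :: s) = '|' :: Fa s := by
  simp [Fa, sp, jn, gB_nil]

lemma Fa_us (s : List Char) : Fa ('_' :: s) = '_' :: Fa s := by
  simp [Fa, sp, jn, gB_nil]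

lemma Fa_run (run t : List Char) (h : ∀ c ∈ run, pvNonDelim c = true)
    (ht : t = [] ∨ ∃ c t', t = c :: t' ∧ pvNonDelim c = false) :
    Fa (run ++ t) = gB run ++ Fa t := by
  have h1 : ∀ c ∈ run, ¬ c = '|' := by
    intro c hc; have := h c hc; simp [pvNonDelim] at this; exact this.1
  have h2 : ∀ c ∈ run, ¬ c = '_' := by
    intro c hc; have := h c hc; simp [pvNonDelim] at this; exact this.2
  have hall : sp '_' run = (run, []) := by
    simpa [sp] using sp_append_nondelim '_' run [] h2
  rcases ht with rfl | ⟨c, t', rfl, hc⟩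
  · have h3 : sp '|' run = (run, []) := by
      simpa [sp] using sp_append_nondelim '|' run [] h1
    simp [Fa, h3, jn, hall, sp, gB_nil]
  · have hc' : c = '|' ∨ c = '_' := by
      revert hc; simp [pvNonDelim]; tauto
    rcases hc' with rfl | rfl
    · rw [Fa_pipe]
      rw [Fa, sp_append_nondelim '|' run _ h1]
      simp [Fa, sp, jn, hall]
    · rw [Fa_us]
      rw [Fa, sp_append_nondelim '|' run _ h1]
      simp [Fa, sp, jn]
      rw [show run ++ '_' :: (sp '|' t').1 = run ++ ('_' :: (sp '|' t').1) from rfl,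
          sp_append_nondelim '_' run _ h2]
      simp [sp]

lemma dropWhile_shape (p : Char → Bool) (l : List Char) :
    l.dropWhile p = [] ∨ ∃ c t, l.dropWhile p = c :: t ∧ p c = false := by
  induction l with
  | nil => simp
  | cons c l ih =>
    by_cases h : p c
    · simpa [List.dropWhile, h] using ih
    · right; exact ⟨c, l, by simp [List.dropWhile, h], by simp [h]⟩

lemma Fa_eq_scanB (s : List Char) : Fa s = scanB s := by
  induction s using scanB.induct with
  | case1 => rw [scanB]; simp [Fa, sp, jn, gB_nil]
  | case2 c rest h ih =>
    have hsplit : c :: rest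
        = (c :: rest.takeWhile pvNonDelim) ++ rest.dropWhile pvNonDelim := by
      simp [List.takeWhile_append_dropWhile]
    have hrun : ∀ x ∈ c :: rest.takeWhile pvNonDelim, pvNonDelim x = true := by
      intro x hx
      rcases List.mem_cons.mp hx with rfl | hx
      · exact h
      · exact List.mem_takeWhile_imp hx
    have ht := dropWhile_shape pvNonDelim rest
    rw [hsplit, Fa_run _ _ hrun (by
      rcases ht with h0 | ⟨a, u, ha, hpa⟩
      · exact Or.inl h0
      · exact Or.inr ⟨a, u, ha, hpa⟩)]
    rw [scanB.eq_def]
    simp [h, ih, gB]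
  | case3 c rest h ih =>
    have hc : c = '|' ∨ c = '_' := by
      revert h; simp [pvNonDelim]; tauto
    rcases hc with rfl | rfl
    · rw [Fa_pipe, scanB]; simp [pvNonDelim, ih]
    · rw [Fa_us, scanB]; simp [pvNonDelim, ih]

-- ===== VERDICT (by name: the statement is the Claim_ definition above) =====
lemma inner_eq (p : List Char) :
    (PySem.Str.join "_" ((pySplit (String.ofList p) "_").map (flipTokA pvPairsA))).toList
      = jn '_' gB (sp '_' p) := by
  have hsep : ("_" : String).toList = ['_'] := rfl
  have hfun : (String.toList ∘ flipTokA pvPairsA ∘ String.ofList) = gB := by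
    funext q; simp [Function.comp, flip_agree, gB]
  simp only [PySem.Str.join, pySplit, hsep, List.map_map, hfun]
  rw [splitOn_eq_sp]
  simpa using join_map_eq_jn '_' gB (sp '_' p)

lemma toList_flip_side (node : String) : (flip_side node).toList = Fa node.toList := by
  have hsep : ("|" : String).toList = ['|'] := rfl
  have hfun : (String.toList ∘ (fun part => PySem.Str.join "_" ((pySplit part "_").map (flipTokA pvPairsA))) ∘ String.ofList)
      = fun part => jn '_' gB (sp '_' part) := by
    funext p; simpa [Function.comp] using inner_eq p
  simp only [PySem.Str.join, pySplit, List.map_map] at hfun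
  simp only [flip_side, PySem.Str.join, pySplit, hsep, List.map_map, hfun]
  rw [splitOn_eq_sp, Fa]
  simpa using join_map_eq_jn '|' (fun part => jn '_' gB (sp '_' part)) (sp '|' node.toList)

-- ===== the verdict proof =====
theorem flip_side_spec : Claim_equal_flip_side := by
  intro node _
  show flip_side node = flip_side_alt node
  have h : (flip_side node).toList = (flip_side_alt node).toList := by
    rw [toList_flip_side, Fa_eq_scanB, flip_side_alt, String.toList_ofList]
  exact String.toList_inj.mp h
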